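-- pv_equiv track=rewrite | github.com/pypi-data/pypi-mirror-375 | packages/rrule-humanize/rrule_humanize-0.1.0.tar.gz/rrule_humanize-0.1.0/rrule_humanize/humanize.py | _format_year_days
-- ===== SOURCE A (Python) =====
-- def _format_year_days(byyearday):
--     """Format year days for human-readable output."""
--     if not byyearday:
--         return None
--
--     if isinstance(byyearday, (list, tuple)):
--         if len(byyearday) == 1:
--             day = byyearday[0]
--             suffix = "th" if 11 <= day <= 13 else {1: "st", 2: "nd", 3: "rd"}.get(day % 10, "th")
--             return f"on the {day}{suffix} day of the year"
--         else:
--             days_with_suffix = []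
--             for day in byyearday:
--                 suffix = "th" if 11 <= day <= 13 else {1: "st", 2: "nd", 3: "rd"}.get(day % 10, "th")
--                 days_with_suffix.append(f"{day}{suffix}")
--             return f"on the {', '.join(days_with_suffix[:-1])} and {days_with_suffix[-1]} days of the year"
--     else:
--         suffix = "th" if 11 <= byyearday <= 13 else {1: "st", 2: "nd", 3: "rd"}.get(byyearday % 10, "th")
--         return f"on the {byyearday}{suffix} day of the year"
-- ===== SOURCE B (Python) =====
-- def _format_year_days(byyearday):
--     """Format year days for human-readable output."""
--     if not byyearday:
--         return None
--     if not isinstance(byyearday, (list, tuple)):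
--         return f"on the {_ord(byyearday)} day of the year"
--     if len(byyearday) == 1:
--         return f"on the {_ord(byyearday[0])} day of the year"
--     return f"on the {_seq(byyearday)} days of the year"
--
--
-- def _ord(d):
--     """Ordinal string for d by arithmetic on the last digit (A's rule: 11..13 -> th)."""
--     m = d % 10
--     if 11 <= d <= 13 or not 1 <= m <= 3:
--         return f"{d}th"
--     return str(d) + ("st", "nd", "rd")[m - 1]
--
--
-- def _seq(days):
--     """Build 'a, b, ... and z' back-to-front as a flat piece list; len(days) >= 2."""
--     pieces = [_ord(days[-1]), " and ", _ord(days[-2])]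
--     for d in reversed(days[:-2]):
--         pieces.append(", ")
--         pieces.append(_ord(d))
--     pieces.reverse()
--     return "".join(pieces)
-- ===== Notes on version B (the rewrite author's own statement) =====
-- stated objective: alternative
-- what changed: Replaces A's forward parts-list with tail slicing and ', '.join by a back-to-front construction: the last two pieces (with ' and ') are laid down first, the remaining days are appended reversed with explicit ', ' pieces, and one final reverse plus ''.join produces the string; the ordinal suffix is computed by arithmetic on the last digit with tuple indexing instead of a dict lookup.
import Mathlib
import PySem

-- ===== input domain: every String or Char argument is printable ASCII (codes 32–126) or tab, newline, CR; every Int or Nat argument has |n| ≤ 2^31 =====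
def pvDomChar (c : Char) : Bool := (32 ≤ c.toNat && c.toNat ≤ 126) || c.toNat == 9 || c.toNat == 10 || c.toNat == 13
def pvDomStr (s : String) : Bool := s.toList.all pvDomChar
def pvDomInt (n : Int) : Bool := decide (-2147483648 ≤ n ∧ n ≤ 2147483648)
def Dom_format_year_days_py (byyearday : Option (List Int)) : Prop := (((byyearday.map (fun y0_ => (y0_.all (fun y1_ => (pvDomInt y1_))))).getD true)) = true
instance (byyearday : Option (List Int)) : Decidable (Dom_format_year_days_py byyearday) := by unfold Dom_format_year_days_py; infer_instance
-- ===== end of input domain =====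

-- B builds the 'a, b and c' sequence back-to-front as a flat piece list (last two
-- pieces first, then the rest reversed, one final reverse + join) instead of A's
-- forward parts list with tail slicing, and computes the ordinal suffix by
-- arithmetic on the last digit instead of a dict lookup (objective: alternative).

-- ===== PORT A =====
-- literal transliteration of A; under the Option (List Int) type the scalar else-branch of A is unreachable
def format_year_days_py (byyearday : Option (List Int)) : Option String :=
  match byyearday with
  | none => none
  | some xs =>
    if xs = [] then none
    else if xs.length = 1 then
      let day := PySem.List.pyGetD xs 0 0
      let suffix := if 11 ≤ day ∧ day ≤ 13 then "th"
        else (PySem.Dict.ofList [((1 : Int), "st"), (2, "nd"), (3, "rd")]).getD (PySem.Int.mod day 10) "th"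
      some ("on the " ++ PySem.Int.toStr day ++ suffix ++ " day of the year")
    else
      let days_with_suffix := xs.foldl (fun acc day =>
        let suffix := if 11 ≤ day ∧ day ≤ 13 then "th"
          else (PySem.Dict.ofList [((1 : Int), "st"), (2, "nd"), (3, "rd")]).getD (PySem.Int.mod day 10) "th"
        acc ++ [PySem.Int.toStr day ++ suffix]) []
      some ("on the " ++ PySem.Str.join ", " days_with_suffix.dropLast ++ " and " ++
        PySem.List.pyGetD days_with_suffix (-1) "" ++ " days of the year")

-- ===== PORT B =====
-- _ord: suffix by arithmetic on the last digit; the tuple index ("st","nd","rd")[m-1]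
-- (m known to be 1, 2 or 3 here) is ported as the explicit three-way choice.
def bOrd (d : Int) : String :=
  let m := PySem.Int.mod d 10
  if (11 ≤ d ∧ d ≤ 13) ∨ ¬ (1 ≤ m ∧ m ≤ 3) then PySem.Int.toStr d ++ "th"
  else PySem.Int.toStr d ++ (if m = 1 then "st" else if m = 2 then "nd" else "rd")

-- _seq: back-to-front flat piece list, one reverse, one "".join; callers pass len ≥ 2.
def bSeq (days : List Int) : String :=
  let pieces := [bOrd (PySem.List.pyGetD days (-1) 0), " and ", bOrd (PySem.List.pyGetD days (-2) 0)]
  let pieces := ((PySem.List.slice days none (some (-2))).reverse).foldl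
      (fun ps d => ps ++ [", "] ++ [bOrd d]) pieces
  PySem.Str.join "" pieces.reverse

def format_year_days_py_alt (byyearday : Option (List Int)) : Option String :=
  match byyearday with
  | none => none
  | some xs =>
    if xs = [] then none
    else if xs.length = 1 then
      some ("on the " ++ bOrd (PySem.List.pyGetD xs 0 0) ++ " day of the year")
    else
      some ("on the " ++ bSeq xs ++ " days of the year")

-- ===== PRECONDITION & SPEC =====
def Spec_format_year_days_py (byyearday : Option (List Int)) (out : Option String) : Prop := out = format_year_days_py_alt byyearday
instance (byyearday : Option (List Int)) (out : Option String) : Decidable (Spec_format_year_days_py byyearday out) := by unfold Spec_format_year_days_py; infer_instance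

-- ===== CLAIM (what is proved, stated in full; the proofs are below) =====
def Claim_equal_format_year_days_py : Prop := ∀ (byyearday : Option (List Int)), Dom_format_year_days_py byyearday → Spec_format_year_days_py byyearday (format_year_days_py byyearday)

-- ===== LEMMAS AND PROOFS =====

-- proof-side characterization of the sequence string 'a, b, …, y and z'
def seqR : List Int → String
  | [a, b] => bOrd a ++ " and " ++ bOrd b
  | a :: rest => bOrd a ++ ", " ++ seqR rest
  | [] => ""

-- A's per-day string (number + dict-based suffix) equals B's arithmetic bOrd.
theorem aPart_eq_bOrd (d : Int) :
    PySem.Int.toStr d ++ (if 11 ≤ d ∧ d ≤ 13 then "th"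
      else (PySem.Dict.ofList [((1 : Int), "st"), (2, "nd"), (3, "rd")]).getD (PySem.Int.mod d 10) "th")
      = bOrd d := by
  unfold bOrd
  by_cases hd : 11 ≤ d ∧ d ≤ 13
  · simp [hd]
  · have h0 : (0:Int) ≤ PySem.Int.mod d 10 := PySem.Int.mod_nonneg d (by norm_num)
    have h10 : PySem.Int.mod d 10 < 10 := PySem.Int.mod_lt d (by norm_num)
    simp only [if_neg hd]
    generalize PySem.Int.mod d 10 = m at *
    interval_cases m <;>
      simp [hd, PySem.Dict.getD, PySem.Dict.get?, PySem.Dict.ofList] <;> decide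

theorem foldl_append_singleton {α β : Type} (f : α → β) (xs : List α) (acc : List β) :
    xs.foldl (fun acc d => acc ++ [f d]) acc = acc ++ xs.map f := by
  induction xs generalizing acc with
  | nil => simp
  | cons x xs ih => simp [List.foldl_cons, ih, List.append_assoc]

-- A's join of all-but-last plus " and " plus last equals the recursive seqR.
theorem join_and_eq_seqR (rest : List Int) (a b : Int) :
    PySem.Str.join ", " ((List.map bOrd (a :: b :: rest)).dropLast) ++ " and " ++
      PySem.List.pyGetD (List.map bOrd (a :: b :: rest)) (-1) "" = seqR (a :: b :: rest) := by
  induction rest generalizing a b with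
  | nil =>
    apply String.toList_inj.mp
    simp [seqR, PySem.Str.toList_join, PySem.Chars.join_singleton,
      PySem.List.pyGetD, PySem.List.pyGet?, PySem.List.pyIdx?]
  | cons c rest ih =>
    have hlast : PySem.List.pyGetD (List.map bOrd (a :: b :: c :: rest)) (-1) ""
        = PySem.List.pyGetD (List.map bOrd (b :: c :: rest)) (-1) "" := by
      rw [PySem.List.pyGetD_neg_one (List.map bOrd (a :: b :: c :: rest)) "" (by simp),
          PySem.List.pyGetD_neg_one (List.map bOrd (b :: c :: rest)) "" (by simp)]
      simp [List.getLast]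
    have hj : PySem.Str.join ", " ((List.map bOrd (a :: b :: c :: rest)).dropLast)
        = bOrd a ++ ", " ++ PySem.Str.join ", " ((List.map bOrd (b :: c :: rest)).dropLast) := by
      have hd : (List.map bOrd (a :: b :: c :: rest)).dropLast
          = bOrd a :: (List.map bOrd (b :: c :: rest)).dropLast := by
        simp [List.dropLast]
      rcases h : (List.map bOrd (b :: c :: rest)).dropLast with _ | ⟨y, l⟩
      · exact absurd (congrArg List.length h) (by simp)
      · rw [hd, h]
        apply String.toList_inj.mp
        simp [PySem.Str.toList_join, PySem.Chars.join_cons_cons]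
    rw [hlast, hj]
    show _ = bOrd a ++ ", " ++ seqR (b :: c :: rest)
    rw [← ih b c]
    apply String.toList_inj.mp
    simp

-- "".join pulls off its head as plain concatenation.
theorem join_empty_cons (x : String) (rest : List String) :
    PySem.Str.join "" (x :: rest) = x ++ PySem.Str.join "" rest := by
  rcases rest with _ | ⟨y, l⟩
  · apply String.toList_inj.mp
    simp [PySem.Str.toList_join, PySem.Chars.join, List.intercalate]
  · apply String.toList_inj.mp
    simp [PySem.Str.toList_join, PySem.Chars.join_cons_cons]

-- the back-to-front appending loop is init ++ a flatMap
theorem foldl_append_two {α β : Type} (f : α → β) (s : β) (xs : List α) (acc : List β) :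
    xs.foldl (fun ps d => ps ++ [s] ++ [f d]) acc = acc ++ xs.flatMap (fun d => [s, f d]) := by
  induction xs generalizing acc with
  | nil => simp
  | cons x xs _ => simp [List.foldl_cons, List.append_assoc, List.flatMap_def]

-- joining the flat piece list equals the recursive seqR.
theorem join_pieces_eq_seqR (l : List Int) (p q : Int) :
    PySem.Str.join "" (l.flatMap (fun d => [bOrd d, ", "]) ++ [bOrd p, " and ", bOrd q])
      = seqR (l ++ [p, q]) := by
  induction l with
  | nil =>
    apply String.toList_inj.mp
    simp [seqR, PySem.Str.toList_join, PySem.Chars.join_cons_cons, PySem.Chars.join_singleton]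
  | cons a l ih =>
    have : ((a :: l).flatMap (fun d => [bOrd d, ", "]) ++ [bOrd p, " and ", bOrd q])
        = bOrd a :: ", " :: (l.flatMap (fun d => [bOrd d, ", "]) ++ [bOrd p, " and ", bOrd q]) := by
      simp
    rw [this, join_empty_cons, join_empty_cons, ih]
    have hseq : seqR (a :: l ++ [p, q]) = bOrd a ++ ", " ++ seqR (l ++ [p, q]) := by
      rcases l with _ | ⟨b, l⟩ <;> simp [seqR]
    rw [hseq]
    apply String.toList_inj.mp
    simp

-- B's back-to-front bSeq equals the recursive seqR on lists written as l ++ [p, q].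
theorem bSeq_eq_seqR (l : List Int) (p q : Int) :
    bSeq (l ++ [p, q]) = seqR (l ++ [p, q]) := by
  unfold bSeq
  dsimp only
  have hm1 : PySem.List.pyGetD (l ++ [p, q]) (-1) 0 = q := by
    rw [show (l ++ [p, q]) = (l ++ [p]) ++ [q] by simp]
    exact PySem.List.pyGetD_neg_one_append_singleton (l ++ [p]) q 0
  have hm2 : PySem.List.pyGetD (l ++ [p, q]) (-2) 0 = p := by
    rw [PySem.List.pyGetD_neg_ofNat (l ++ [p, q]) 2 0 (by omega) (by simp)]
    simp
  have hsl : PySem.List.slice (l ++ [p, q]) none (some (-2)) = l := by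
    simp [PySem.List.slice]
  rw [hm1, hm2, hsl, foldl_append_two]
  rw [show ([bOrd q, " and ", bOrd p] ++ l.reverse.flatMap (fun d => [", ", bOrd d])).reverse
      = l.flatMap (fun d => [bOrd d, ", "]) ++ [bOrd p, " and ", bOrd q] by
    simp [List.reverse_flatMap, Function.comp_def]]
  exact join_pieces_eq_seqR l p q

theorem exists_two_last (a b : Int) (rest : List Int) :
    ∃ l p q, a :: b :: rest = l ++ [p, q] := by
  induction rest generalizing a b with
  | nil => exact ⟨[], a, b, rfl⟩
  | cons c rest ih =>
    obtain ⟨l, p, q, h⟩ := ih b c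
    exact ⟨a :: l, p, q, by simp [h]⟩

-- ===== VERDICT (by name: the statement is the Claim_ definition above) =====
theorem format_year_days_py_spec : Claim_equal_format_year_days_py := by
  intro byyearday _
  unfold Spec_format_year_days_py format_year_days_py format_year_days_py_alt
  match byyearday with
  | none => rfl
  | some xs =>
    match xs with
    | [] => rfl
    | [d] =>
      dsimp only
      have h := aPart_eq_bOrd d
      rw [if_neg (show ¬([d] : List Int) = [] by simp), if_neg (show ¬([d] : List Int) = [] by simp),
          if_pos (show ([d] : List Int).length = 1 from rfl), if_pos (show ([d] : List Int).length = 1 from rfl)]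
      simp only [PySem.List.pyGetD_zero_cons, ← h]
      apply congrArg
      apply String.toList_inj.mp
      simp
    | d1 :: d2 :: rest =>
      dsimp only
      have hmap : (d1 :: d2 :: rest).map (fun day =>
          PySem.Int.toStr day ++ (if 11 ≤ day ∧ day ≤ 13 then "th"
            else (PySem.Dict.ofList [((1 : Int), "st"), (2, "nd"), (3, "rd")]).getD (PySem.Int.mod day 10) "th"))
          = List.map bOrd (d1 :: d2 :: rest) := by
        apply List.map_congr_left
        intro d _
        exact aPart_eq_bOrd d
      have h := join_and_eq_seqR rest d1 d2
      obtain ⟨l, p, q, hlpq⟩ := exists_two_last d1 d2 rest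
      have hb : bSeq (d1 :: d2 :: rest) = seqR (d1 :: d2 :: rest) := by
        rw [hlpq]; exact bSeq_eq_seqR l p q
      simp only [foldl_append_singleton, List.nil_append, hmap, ← h, hb]
      have hlen : ¬ (d1 :: d2 :: rest).length = 1 := by simp
      simp only [if_neg (by simp : ¬(d1 :: d2 :: rest : List Int) = []), if_neg hlen]
      apply congrArg
      apply String.toList_inj.mp
      simp
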